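-- pv_equiv track=rewrite | github.com/Jonbean/formalize-cot | translators/amr2lean/amr2lean.py | _rerank_const_in_lets
-- ===== SOURCE A (Python) =====
-- def _rerank_const_in_lets(let_bindings):
--     new_let_bindings = []
--     for let_binding in let_bindings:
--         if '{' in let_binding or '⟨' in let_binding:
--             new_let_bindings.insert(0, let_binding)
--         else:
--             new_let_bindings.append(let_binding)
--     return new_let_bindings
-- ===== SOURCE B (Python) =====
-- def _rerank_const_in_lets(let_bindings):
--     specials = []
--     others = []
--     for lb in let_bindings:
--         if '{' in lb or '\u27e8' in lb:
--             specials.append(lb)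
--         else:
--             others.append(lb)
--     return specials[::-1] + others
-- ===== Notes on version B (the rewrite author's own statement) =====
-- stated objective: alternative
-- what changed: Single pass partitioning into two appended lists, then reversed specials concatenated with the others, instead of repeated insert(0) into one growing list.
import Mathlib
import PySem

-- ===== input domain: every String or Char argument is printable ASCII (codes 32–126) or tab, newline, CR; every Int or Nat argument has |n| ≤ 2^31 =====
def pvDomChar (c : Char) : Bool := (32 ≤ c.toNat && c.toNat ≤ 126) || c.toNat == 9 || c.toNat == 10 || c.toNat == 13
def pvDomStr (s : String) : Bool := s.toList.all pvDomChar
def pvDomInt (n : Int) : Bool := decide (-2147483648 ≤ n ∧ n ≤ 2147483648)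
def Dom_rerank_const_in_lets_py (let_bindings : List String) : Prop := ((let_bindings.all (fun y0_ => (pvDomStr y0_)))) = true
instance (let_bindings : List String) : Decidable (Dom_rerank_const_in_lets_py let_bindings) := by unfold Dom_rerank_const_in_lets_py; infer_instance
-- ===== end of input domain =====

-- ===== PORT A =====
def rerank_const_in_lets_py (let_bindings : List String) : List String :=
  let_bindings.foldl
    (fun new_let_bindings let_binding =>
      if PySem.Str.isIn "{" let_binding || PySem.Str.isIn "⟨" let_binding then
        let_binding :: new_let_bindings
      else
        new_let_bindings ++ [let_binding])
    []

-- ===== PORT B =====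
-- B: one pass partitioning into (specials, others), then reversed specials ++ others
def rerank_const_in_lets_py_alt (let_bindings : List String) : List String :=
  let pr := let_bindings.foldl
    (fun so lb =>
      if PySem.Str.isIn "{" lb || PySem.Str.isIn "⟨" lb then
        (so.1 ++ [lb], so.2)
      else
        (so.1, so.2 ++ [lb]))
    ([], [])
  pr.1.reverse ++ pr.2

-- ===== PRECONDITION & SPEC =====
def Spec_rerank_const_in_lets_py (let_bindings : List String) (out : List String) : Prop := out = rerank_const_in_lets_py_alt let_bindings
instance (let_bindings : List String) (out : List String) : Decidable (Spec_rerank_const_in_lets_py let_bindings out) := by unfold Spec_rerank_const_in_lets_py; infer_instance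

-- ===== CLAIM (what is proved, stated in full; the proofs are below) =====
def Claim_equal_rerank_const_in_lets_py : Prop := ∀ (let_bindings : List String), Dom_rerank_const_in_lets_py let_bindings → Spec_rerank_const_in_lets_py let_bindings (rerank_const_in_lets_py let_bindings)

-- ===== LEMMAS AND PROOFS =====
theorem pv_foldA (l : List String) (sp ot : List String) :
    l.foldl
      (fun new_let_bindings let_binding =>
        if PySem.Str.isIn "{" let_binding || PySem.Str.isIn "⟨" let_binding then
          let_binding :: new_let_bindings
        else
          new_let_bindings ++ [let_binding])
      (sp.reverse ++ ot)
    = (sp ++ l.filter (fun lb => PySem.Str.isIn "{" lb || PySem.Str.isIn "⟨" lb)).reverse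
      ++ (ot ++ l.filter (fun lb => !(PySem.Str.isIn "{" lb || PySem.Str.isIn "⟨" lb))) := by
  induction l generalizing sp ot with
  | nil => simp
  | cons x xs ih =>
    simp only [List.foldl_cons, List.filter_cons]
    by_cases h : (PySem.Str.isIn "{" x || PySem.Str.isIn "⟨" x) = true
    · have : x :: (sp.reverse ++ ot) = (sp ++ [x]).reverse ++ ot := by simp
      rw [if_pos h, this, ih, if_pos h, if_neg (by rw [h]; decide)]
      simp
    · have hf : (PySem.Str.isIn "{" x || PySem.Str.isIn "⟨" x) = false := Bool.eq_false_iff.mpr h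
      have hp : (!(PySem.Str.isIn "{" x || PySem.Str.isIn "⟨" x)) = true := by rw [hf]; rfl
      have hacc : (sp.reverse ++ ot) ++ [x] = sp.reverse ++ (ot ++ [x]) := by simp
      rw [if_neg h, hacc, ih, if_neg h, if_pos hp]
      simp

theorem pv_foldB (l : List String) (sp ot : List String) :
    l.foldl
      (fun so lb =>
        if PySem.Str.isIn "{" lb || PySem.Str.isIn "⟨" lb then
          (so.1 ++ [lb], so.2)
        else
          (so.1, so.2 ++ [lb]))
      (sp, ot)
    = (sp ++ l.filter (fun lb => PySem.Str.isIn "{" lb || PySem.Str.isIn "⟨" lb),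
       ot ++ l.filter (fun lb => !(PySem.Str.isIn "{" lb || PySem.Str.isIn "⟨" lb))) := by
  induction l generalizing sp ot with
  | nil => simp
  | cons x xs ih =>
    simp only [List.foldl_cons, List.filter_cons]
    by_cases h : (PySem.Str.isIn "{" x || PySem.Str.isIn "⟨" x) = true
    · rw [if_pos h, ih, if_pos h, if_neg (by rw [h]; decide)]
      simp
    · have hf : (PySem.Str.isIn "{" x || PySem.Str.isIn "⟨" x) = false := Bool.eq_false_iff.mpr h
      have hp : (!(PySem.Str.isIn "{" x || PySem.Str.isIn "⟨" x)) = true := by rw [hf]; rfl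
      rw [if_neg h, ih, if_neg h, if_pos hp]
      simp

-- ===== VERDICT (by name: the statement is the Claim_ definition above) =====
theorem rerank_const_in_lets_py_spec : Claim_equal_rerank_const_in_lets_py := by
  intro l _
  unfold Spec_rerank_const_in_lets_py rerank_const_in_lets_py rerank_const_in_lets_py_alt
  rw [pv_foldB l [] []]
  have := pv_foldA l [] []
  simpa using this
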